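-- pv_equiv track=rewrite | github.com/Sanjeevsnair/Gambling-game | app.py | get_highest_betters
-- ===== SOURCE A (Python) =====
-- def get_highest_betters(bets_ref, winning_number):
--     """
--     Find players who bet the highest amount on the winning number.
--     Returns a list of tuples (player_id, bet_amount) for highest betters.
--     """
--     highest_bet = 0
--     highest_betters = []
--
--     # First find all players who chose the winning number
--     for player, bet in bets_ref.items():
--         if bet["chosen_number"] == winning_number:
--             bet_amount = bet["bet_amount"]
--             if bet_amount > highest_bet:
--                 # New highest bet - clear previous and start new list
--                 highest_bet = bet_amount
--                 highest_betters = [(player, bet_amount)]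
--             elif bet_amount == highest_bet:
--                 # Same highest bet - add to list
--                 highest_betters.append((player, bet_amount))
--
--     return highest_betters
-- ===== SOURCE B (Python) =====
-- def get_highest_betters(bets_ref, winning_number):
--     """
--     Find players who bet the highest amount on the winning number.
--     Returns a list of tuples (player_id, bet_amount) for highest betters.
--     """
--     winners = [(player, bet["bet_amount"])
--                for player, bet in bets_ref.items()
--                if bet["chosen_number"] == winning_number]
--     highest = max([amount for _, amount in winners] + [0])
--     return [(player, amount) for player, amount in winners if amount == highest]
-- ===== Notes on version B (the rewrite author's own statement) =====
-- stated objective: simpler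
-- what changed: Replaced A's fused single-pass running-max scan with mutable clear/append state by three shaped passes: filter the winning entries, reduce to the maximum amount (with 0 as Python-matching baseline), filter the winners equal to it.
import Mathlib
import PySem

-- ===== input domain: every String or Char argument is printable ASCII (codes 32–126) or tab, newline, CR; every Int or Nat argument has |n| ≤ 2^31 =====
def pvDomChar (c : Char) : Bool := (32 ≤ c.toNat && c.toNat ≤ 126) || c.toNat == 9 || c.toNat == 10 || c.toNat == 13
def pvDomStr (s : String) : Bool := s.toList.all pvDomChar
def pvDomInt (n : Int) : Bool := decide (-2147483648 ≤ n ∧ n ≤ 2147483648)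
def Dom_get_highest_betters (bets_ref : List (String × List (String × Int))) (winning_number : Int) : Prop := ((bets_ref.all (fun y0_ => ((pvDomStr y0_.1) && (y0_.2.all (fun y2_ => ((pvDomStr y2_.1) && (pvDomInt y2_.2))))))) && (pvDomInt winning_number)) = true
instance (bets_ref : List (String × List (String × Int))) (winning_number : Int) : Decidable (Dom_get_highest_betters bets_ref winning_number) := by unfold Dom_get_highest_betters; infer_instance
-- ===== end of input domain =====

-- B replaces A's fused running-max scan (mutable clear/append state) by three passes:
-- filter the winning entries, reduce to the maximum amount (0 baseline, as in A), filter those equal to it.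
-- Return-value equivalence only; neither version mutates its arguments.

-- ===== PORT A =====
-- the for-loop of A, carrying (highest_bet, highest_betters) as explicit state;
-- dict lookups bet["…"] are first-match association-list lookups (getD 0 is only
-- reached outside Pre_, where Python raises KeyError)
def ghbLoop (w : Int) : List (String × List (String × Int)) → Int → List (String × Int) → List (String × Int)
  | [], _, acc => acc
  | (p, bet) :: rest, h, acc =>
    if (List.lookup "chosen_number" bet).getD 0 = w then
      let a := (List.lookup "bet_amount" bet).getD 0
      if a > h then ghbLoop w rest a [(p, a)]
      else if a = h then ghbLoop w rest h (acc ++ [(p, a)])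
      else ghbLoop w rest h acc
    else ghbLoop w rest h acc

def get_highest_betters (bets_ref : List (String × List (String × Int))) (winning_number : Int) : List (String × Int) :=
  ghbLoop winning_number bets_ref 0 []

-- ===== PORT B =====
-- pass 1 of B: the winners comprehension
def ghbWinners (w : Int) (l : List (String × List (String × Int))) : List (String × Int) :=
  l.filterMap (fun pb =>
    if (List.lookup "chosen_number" pb.2).getD 0 = w then
      some (pb.1, (List.lookup "bet_amount" pb.2).getD 0)
    else none)

def get_highest_betters_alt (bets_ref : List (String × List (String × Int))) (winning_number : Int) : List (String × Int) :=
  let winners := ghbWinners winning_number bets_ref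
  let highest := (winners.map (fun x => x.2)).foldl max 0   -- max([amounts] + [0])
  winners.filter (fun x => x.2 == highest)

-- ===== PRECONDITION & SPEC =====
-- Pre_ excludes exactly the inputs where Python A raises KeyError: a bet dict without
-- "chosen_number", or a bet on the winning number without "bet_amount".
def Pre_get_highest_betters (bets_ref : List (String × List (String × Int))) (winning_number : Int) : Prop :=
  ∀ pb ∈ bets_ref,
    (List.lookup "chosen_number" pb.2).isSome = true ∧
    (List.lookup "chosen_number" pb.2 = some winning_number →
      (List.lookup "bet_amount" pb.2).isSome = true)
instance (bets_ref : List (String × List (String × Int))) (winning_number : Int) : Decidable (Pre_get_highest_betters bets_ref winning_number) := by unfold Pre_get_highest_betters; infer_instance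

def pvWitness_get_highest_betters : (List (String × List (String × Int))) × Int :=
  ([("alice", [("chosen_number", 7), ("bet_amount", 5)]),
    ("bob", [("chosen_number", 3), ("bet_amount", 9)])], 7)

def Spec_get_highest_betters (bets_ref : List (String × List (String × Int))) (winning_number : Int) (out : List (String × Int)) : Prop := out = get_highest_betters_alt bets_ref winning_number
instance (bets_ref : List (String × List (String × Int))) (winning_number : Int) (out : List (String × Int)) : Decidable (Spec_get_highest_betters bets_ref winning_number out) := by unfold Spec_get_highest_betters; infer_instance

-- ===== CLAIM (what is proved, stated in full; the proofs are below) =====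
def Claim_equal_get_highest_betters : Prop := ∀ (bets_ref : List (String × List (String × Int))) (winning_number : Int), Dom_get_highest_betters bets_ref winning_number → Pre_get_highest_betters bets_ref winning_number → Spec_get_highest_betters bets_ref winning_number (get_highest_betters bets_ref winning_number)

-- ===== LEMMAS AND PROOFS =====

theorem le_foldl_max (xs : List Int) (a : Int) : a ≤ xs.foldl max a := by
  induction xs generalizing a with
  | nil => simp
  | cons x xs ih => exact le_trans (le_max_left a x) (ih (max a x))

-- the loop invariant: A's loop from state (h, acc) yields acc (kept only if no amount
-- beats h) followed by the winners whose amount equals the running maximum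
theorem ghbLoop_eq (w : Int) (l : List (String × List (String × Int))) :
    ∀ (h : Int) (acc : List (String × Int)),
    ghbLoop w l h acc =
      (if ((ghbWinners w l).map (fun x => x.2)).foldl max h = h then acc else []) ++
        (ghbWinners w l).filter (fun x => x.2 == ((ghbWinners w l).map (fun x => x.2)).foldl max h) := by
  induction l with
  | nil => intro h acc; simp [ghbLoop, ghbWinners]
  | cons pb rest ih =>
    intro h acc
    obtain ⟨p, bet⟩ := pb
    by_cases hc : (List.lookup "chosen_number" bet).getD 0 = w
    · set a := (List.lookup "bet_amount" bet).getD 0 with ha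
      have hw : ghbWinners w ((p, bet) :: rest) = (p, a) :: ghbWinners w rest := by
        simp [ghbWinners, hc, ha]
      rw [hw]
      simp only [List.map_cons, List.foldl_cons, List.filter_cons]
      rcases lt_trichotomy h a with hlt | heq | hgt
      · -- a > h : clear and restart
        have hmax : max h a = a := max_eq_right (le_of_lt hlt)
        simp only [hmax]
        have hF : a ≤ ((ghbWinners w rest).map (fun x => x.2)).foldl max a := le_foldl_max _ _
        have hne : ¬ (((ghbWinners w rest).map (fun x => x.2)).foldl max a = h) := by omega
        rw [ghbLoop]; simp only [hc, if_true, ← ha, if_pos hlt]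
        rw [ih a [(p, a)]]
        by_cases hFa : ((ghbWinners w rest).map (fun x => x.2)).foldl max a = a
        · simp [hFa]
          intro e; exact absurd e (by omega)
        · have : ¬ (a == ((ghbWinners w rest).map (fun x => x.2)).foldl max a) = true := by
            simp [beq_iff_eq]; omega
          simp [hFa, hne, this]
      · -- a = h : append
        have hmax : max h a = h := max_eq_left (le_of_eq heq.symm)
        simp only [hmax]
        rw [ghbLoop]; simp only [hc, if_true, ← ha]
        rw [if_neg (by omega), if_pos heq.symm]
        rw [ih h (acc ++ [(p, a)])]
        have hF : h ≤ ((ghbWinners w rest).map (fun x => x.2)).foldl max h := le_foldl_max _ _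
        by_cases hFh : ((ghbWinners w rest).map (fun x => x.2)).foldl max h = h
        · simp [hFh, heq.symm]
        · have hA : ¬ (a == ((ghbWinners w rest).map (fun x => x.2)).foldl max h) = true := by
            simp [beq_iff_eq]; omega
          simp [hFh, hA]
      · -- a < h : skip
        have hmax : max h a = h := max_eq_left (le_of_lt hgt)
        simp only [hmax]
        have hF : h ≤ ((ghbWinners w rest).map (fun x => x.2)).foldl max h := le_foldl_max _ _
        have : ¬ (a == ((ghbWinners w rest).map (fun x => x.2)).foldl max h) = true := by
          simp [beq_iff_eq]; omega
        rw [ghbLoop]; simp only [hc, if_true, ← ha]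
        rw [if_neg (by omega), if_neg (by omega)]
        rw [ih h acc]
        simp [this]
    · have hw : ghbWinners w ((p, bet) :: rest) = ghbWinners w rest := by
        simp [ghbWinners, hc]
      rw [hw, ghbLoop]
      simp only [hc, if_false]
      exact ih h acc

-- ===== VERDICT (by name: the statement is the Claim_ definition above) =====
theorem get_highest_betters_spec : Claim_equal_get_highest_betters := by
  intro bets_ref winning_number _ _
  unfold Spec_get_highest_betters get_highest_betters get_highest_betters_alt
  rw [ghbLoop_eq]
  split <;> simp
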